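-- pv_equiv track=rewrite | github.com/Sacral/WebDiff | site_diff_visualizer.py | _filter_moved_boxes
-- ===== SOURCE A (Python) =====
-- from typing import Any, Dict, List, Optional, Sequence, Set, Tuple
--
-- def _filter_moved_boxes(
--     boxes: List[Tuple[int, int, int, int]],
--     new_text_regions: List[Tuple[str, Tuple[int, int, int, int]]],
--     old_texts: Set[str],
-- ) -> List[Tuple[int, int, int, int]]:
--     """Remove diff boxes from the *new* image whose text content all exists in old.
--
--     A box whose every detected text element is present somewhere in the old page is
--     treated as "content that merely moved" rather than genuinely new content, and is
--     therefore suppressed.  Boxes with no detectable text (image/colour changes) and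
--     boxes containing at least one brand-new text token are kept.
--     """
--     result: List[Tuple[int, int, int, int]] = []
--     for bl, bt, br, bb in boxes:
--         texts_in_box: Set[str] = set()
--         for text, (tl, tt, tr, tb) in new_text_regions:
--             if tr > bl and br > tl and tb > bt and bb > tt:
--                 texts_in_box.add(text)
--         if not texts_in_box:
--             result.append((bl, bt, br, bb))
--         elif all(t in old_texts for t in texts_in_box):
--             pass  # all content existed in old → moved, not new
--         else:
--             result.append((bl, bt, br, bb))
--     return result
-- ===== SOURCE B (Python) =====
-- def _filter_moved_boxes(boxes, new_text_regions, old_texts):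
--     def ov(b, r):
--         bl, bt, br, bb = b
--         tl, tt, tr, tb = r
--         return tr > bl and br > tl and tb > bt and bb > tt
--
--     all_rects = [rect for _, rect in new_text_regions]
--     fresh_rects = [rect for text, rect in new_text_regions if text not in old_texts]
--     return [b for b in boxes
--             if any(ov(b, r) for r in fresh_rects)
--             or not any(ov(b, r) for r in all_rects)]
-- ===== Notes on version B (the rewrite author's own statement) =====
-- stated objective: alternative
-- what changed: Instead of building a per-box set of overlapping texts and then testing it against old_texts, B precomputes once the rectangles of regions whose text is new, and keeps a box iff it overlaps a fresh-text rectangle or overlaps no region at all (two existence tests, no per-box set).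
import Mathlib
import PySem

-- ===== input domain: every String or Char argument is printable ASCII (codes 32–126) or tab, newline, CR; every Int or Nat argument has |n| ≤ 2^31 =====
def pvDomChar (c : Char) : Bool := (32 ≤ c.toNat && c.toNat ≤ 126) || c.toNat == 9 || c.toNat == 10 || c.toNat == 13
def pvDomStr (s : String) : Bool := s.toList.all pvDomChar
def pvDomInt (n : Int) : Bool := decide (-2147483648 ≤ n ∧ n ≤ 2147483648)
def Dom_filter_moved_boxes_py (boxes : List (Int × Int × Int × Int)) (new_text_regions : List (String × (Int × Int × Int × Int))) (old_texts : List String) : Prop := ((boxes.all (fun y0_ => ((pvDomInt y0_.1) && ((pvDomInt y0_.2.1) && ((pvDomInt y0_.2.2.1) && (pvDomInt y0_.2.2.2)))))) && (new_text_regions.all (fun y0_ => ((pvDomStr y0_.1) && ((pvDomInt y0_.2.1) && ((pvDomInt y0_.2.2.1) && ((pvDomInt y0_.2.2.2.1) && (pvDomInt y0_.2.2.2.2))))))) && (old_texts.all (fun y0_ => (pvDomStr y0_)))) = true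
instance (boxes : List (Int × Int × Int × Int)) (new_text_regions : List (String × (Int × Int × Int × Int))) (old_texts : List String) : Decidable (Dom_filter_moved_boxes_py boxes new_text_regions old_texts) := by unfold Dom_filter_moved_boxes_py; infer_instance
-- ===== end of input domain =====

-- B drops A's per-box set of overlapping texts: it pre-partitions the regions once and keeps a
-- box iff it overlaps a fresh-text rectangle or overlaps no region at all (alternative, same cost).


-- ===== PORT A =====
-- the overlap test 'tr > bl and br > tl and tb > bt and bb > tt' (identical condition in both Pythons)
def pvOverlap (b r : Int × Int × Int × Int) : Bool :=
  r.2.2.1 > b.1 && b.2.2.1 > r.1 && r.2.2.2 > b.2.1 && b.2.2.2 > r.2.1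

def filter_moved_boxes_py (boxes : List (Int × Int × Int × Int)) (new_text_regions : List (String × (Int × Int × Int × Int))) (old_texts : List String) : List (Int × Int × Int × Int) :=
  boxes.foldl (fun result b =>
    let texts_in_box : PySem.Set String :=
      new_text_regions.foldl (fun s tr =>
        if pvOverlap b tr.2 then PySem.Set.add s tr.1 else s) PySem.Set.empty
    if texts_in_box.isEmpty then result ++ [b]
    else if texts_in_box.all (fun t => old_texts.contains t) then result
    else result ++ [b]) []

-- ===== PORT B =====
def filter_moved_boxes_py_alt (boxes : List (Int × Int × Int × Int)) (new_text_regions : List (String × (Int × Int × Int × Int))) (old_texts : List String) : List (Int × Int × Int × Int) :=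
  let all_rects := new_text_regions.map (fun tr => tr.2)
  let fresh_rects := (new_text_regions.filter (fun tr => !(old_texts.contains tr.1))).map (fun tr => tr.2)
  boxes.filter (fun b => fresh_rects.any (fun r => pvOverlap b r) || !(all_rects.any (fun r => pvOverlap b r)))

-- ===== PRECONDITION & SPEC =====
def Spec_filter_moved_boxes_py (boxes : List (Int × Int × Int × Int)) (new_text_regions : List (String × (Int × Int × Int × Int))) (old_texts : List String) (out : List (Int × Int × Int × Int)) : Prop := out = filter_moved_boxes_py_alt boxes new_text_regions old_texts
instance (boxes : List (Int × Int × Int × Int)) (new_text_regions : List (String × (Int × Int × Int × Int))) (old_texts : List String) (out : List (Int × Int × Int × Int)) : Decidable (Spec_filter_moved_boxes_py boxes new_text_regions old_texts out) := by unfold Spec_filter_moved_boxes_py; infer_instance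

-- ===== CLAIM (what is proved, stated in full; the proofs are below) =====
def Claim_equal_filter_moved_boxes_py : Prop := ∀ (boxes : List (Int × Int × Int × Int)) (new_text_regions : List (String × (Int × Int × Int × Int))) (old_texts : List String), Dom_filter_moved_boxes_py boxes new_text_regions old_texts → Spec_filter_moved_boxes_py boxes new_text_regions old_texts (filter_moved_boxes_py boxes new_text_regions old_texts)

-- ===== LEMMAS AND PROOFS =====

-- membership in the set A's inner loop builds
theorem pv_mem_texts (b : Int × Int × Int × Int) (regions : List (String × (Int × Int × Int × Int)))
    (s : PySem.Set String) (t : String) :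
    t ∈ regions.foldl (fun s tr => if pvOverlap b tr.2 then PySem.Set.add s tr.1 else s) s ↔
      t ∈ s ∨ ∃ tr ∈ regions, pvOverlap b tr.2 = true ∧ tr.1 = t := by
  induction regions generalizing s with
  | nil => simp
  | cons hd tl ih =>
    simp only [List.foldl_cons, ih]
    by_cases h : pvOverlap b hd.2 = true
    · simp [h, PySem.Set.mem_add]
      try tauto
    · simp [h]
      try tauto

theorem pv_keep_eq (b : Int × Int × Int × Int) (regions : List (String × (Int × Int × Int × Int)))
    (old_texts : List String) :
    (let texts : PySem.Set String :=
        regions.foldl (fun s tr => if pvOverlap b tr.2 then PySem.Set.add s tr.1 else s) PySem.Set.empty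
     (texts.isEmpty || !(texts.all (fun t => old_texts.contains t)))) =
    (((regions.filter (fun tr => !(old_texts.contains tr.1))).map (fun tr => tr.2)).any (fun r => pvOverlap b r)
      || !((regions.map (fun tr => tr.2)).any (fun r => pvOverlap b r))) := by
  simp only []
  rw [Bool.eq_iff_iff]
  set texts := regions.foldl (fun s tr => if pvOverlap b tr.2 then PySem.Set.add s tr.1 else s) PySem.Set.empty with htexts
  have hmem : ∀ t, t ∈ texts ↔ ∃ tr ∈ regions, pvOverlap b tr.2 = true ∧ tr.1 = t := by
    intro t
    rw [htexts, pv_mem_texts]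
    simp [PySem.Set.empty]
  simp only [Bool.or_eq_true, Bool.not_eq_true', List.isEmpty_iff, List.all_eq_false,
    List.any_eq_false, List.any_map, List.any_eq_true, List.mem_filter, Bool.not_eq_true']
  constructor
  · rintro (h | ⟨t, ht, hnot⟩)
    · refine Or.inr ?_
      rintro tr htr hov
      have : tr.1 ∈ texts := (hmem tr.1).mpr ⟨tr, htr, hov, rfl⟩
      simp [h] at this
    · obtain ⟨tr, htr, hov, hteq⟩ := (hmem t).mp ht
      exact Or.inl ⟨tr, ⟨htr, by rw [hteq]; simpa using hnot⟩, hov⟩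
  · rintro (⟨tr, ⟨htr, hfresh⟩, hov⟩ | h)
    · refine Or.inr ⟨tr.1, (hmem tr.1).mpr ⟨tr, htr, hov, rfl⟩, ?_⟩
      simpa using hfresh
    · refine Or.inl (List.eq_nil_iff_forall_not_mem.mpr ?_)
      intro t ht
      obtain ⟨tr, htr, hov, _⟩ := (hmem t).mp ht
      exact h tr htr hov

-- the three-way branch of A's loop body collapses to one boolean test
theorem pv_if_shape (e a : Bool) (r : List (Int × Int × Int × Int)) (x : Int × Int × Int × Int) :
    (if e then r ++ [x] else if a then r else r ++ [x]) =
    (if (e || !a) then r ++ [x] else r) := by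
  cases e <;> cases a <;> simp

-- ===== VERDICT (by name: the statement is the Claim_ definition above) =====
theorem filter_moved_boxes_py_spec : Claim_equal_filter_moved_boxes_py := by
  intro boxes regions old _
  unfold Spec_filter_moved_boxes_py filter_moved_boxes_py filter_moved_boxes_py_alt
  have hstep : ∀ (result : List (Int × Int × Int × Int)) (b : Int × Int × Int × Int),
      (let texts : PySem.Set String :=
          regions.foldl (fun s tr => if pvOverlap b tr.2 then PySem.Set.add s tr.1 else s) PySem.Set.empty
       if texts.isEmpty then result ++ [b]
       else if texts.all (fun t => old.contains t) then result
       else result ++ [b]) =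
      (if (((regions.filter (fun tr => !(old.contains tr.1))).map (fun tr => tr.2)).any (fun r => pvOverlap b r)
            || !((regions.map (fun tr => tr.2)).any (fun r => pvOverlap b r))) = true
       then result ++ [b] else result) := by
    intro result b
    rw [← pv_keep_eq b regions old]
    exact pv_if_shape _ _ _ _
  simp only [hstep]
  rw [PySem.List.foldl_append_if_eq_filter]
  simp
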